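-- pv_equiv track=rewrite | github.com/kika1s1/A2SV | 1524-string-matching-in-an-array/string-matching-in-an-array.py | stringMatching
-- ===== SOURCE A (Python) =====
-- from typing import List
--
-- def stringMatching(words: List[str]) -> List[str]:
--     ans = []
--     for index, word in enumerate(words):
--         for j, char in enumerate(words):
--             if index != j and word in char:
--                 ans.append(word)
--                 break
--
--     return ans
-- ===== SOURCE B (Python) =====
-- from typing import List
-- from collections import Counter
--
-- def stringMatching(words: List[str]) -> List[str]:
--     # A word qualifies iff it occurs twice in the list (a duplicate contains it)
--     # or it is a substring of some strictly longer word.  Scan longer words via a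
--     # length-descending sort so the inner scan stops as soon as lengths drop to ours.
--     cnt = Counter(words)
--     by_len = sorted(words, key=len, reverse=True)
--     ans = []
--     for w in words:
--         if cnt[w] >= 2:
--             ans.append(w)
--             continue
--         for u in by_len:
--             if len(u) <= len(w):
--                 break
--             if w in u:
--                 ans.append(w)
--                 break
--     return ans
-- ===== Notes on version B (the rewrite author's own statement) =====
-- stated objective: alternative
-- what changed: Replaces the index-comparing double scan with a Counter for duplicates plus a single length-descending sorted list scanned with an early break, using the fact that a word is contained in another word iff it is duplicated or is a substring of a strictly longer word.
import Mathlib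
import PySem

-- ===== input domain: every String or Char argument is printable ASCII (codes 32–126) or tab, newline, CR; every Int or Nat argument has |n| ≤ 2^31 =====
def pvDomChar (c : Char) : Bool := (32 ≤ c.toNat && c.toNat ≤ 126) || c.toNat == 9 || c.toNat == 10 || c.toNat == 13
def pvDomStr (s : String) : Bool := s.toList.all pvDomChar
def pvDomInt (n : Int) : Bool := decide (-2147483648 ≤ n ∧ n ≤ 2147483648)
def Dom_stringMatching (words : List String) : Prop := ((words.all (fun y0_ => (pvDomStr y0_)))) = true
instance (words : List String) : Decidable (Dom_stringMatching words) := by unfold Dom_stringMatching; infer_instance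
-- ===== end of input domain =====

-- B replaces A's index-comparing double scan by a duplicate Counter plus one
-- length-descending sorted list scanned with an early break (alternative, same worst-case cost).


-- ===== PORT A =====
-- inner 'for j, char in enumerate(words): if index != j and word in char: …; break'
def aInner (index : Int) (word : String) : List (Int × String) → Bool
  | [] => false
  | (j, c) :: rest =>
    if (index != j) && PySem.Str.isIn word c then true
    else aInner index word rest

def stringMatching (words : List String) : List String :=
  (PySem.List.enumerate words).foldl
    (fun ans p =>
      if aInner p.1 p.2 (PySem.List.enumerate words) then ans ++ [p.2] else ans) []

-- ===== PORT B =====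
-- inner 'for u in by_len: if len(u) <= len(w): break; if w in u: …; break'
def bInner (w : String) : List String → Bool
  | [] => false
  | u :: rest =>
    if PySem.Str.len u ≤ PySem.Str.len w then false
    else if PySem.Str.isIn w u then true
    else bInner w rest

def stringMatching_alt (words : List String) : List String :=
  let cnt := PySem.Dict.counter words
  let byLen := PySem.List.sorted words PySem.Str.len true
  words.foldl
    (fun ans w =>
      if 2 ≤ cnt.getD w 0 then ans ++ [w]
      else if bInner w byLen then ans ++ [w]
      else ans) []

-- ===== PRECONDITION & SPEC =====
def Spec_stringMatching (words : List String) (out : List String) : Prop := out = stringMatching_alt words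
instance (words : List String) (out : List String) : Decidable (Spec_stringMatching words out) := by unfold Spec_stringMatching; infer_instance

-- ===== CLAIM (what is proved, stated in full; the proofs are below) =====
def Claim_equal_stringMatching : Prop := ∀ (words : List String), Dom_stringMatching words → Spec_stringMatching words (stringMatching words)

-- ===== LEMMAS AND PROOFS =====

theorem aInner_eq_any (i : Int) (w : String) (l : List (Int × String)) :
    aInner i w l = l.any (fun p => (i != p.1) && PySem.Str.isIn w p.2) := by
  induction l with
  | nil => rfl
  | cons p rest ih =>
    obtain ⟨j, c⟩ := p
    show (if (i != j) && PySem.Str.isIn w c then true else aInner i w rest) = _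
    cases h : ((i != j) && PySem.Str.isIn w c) with
    | true => simp only [List.any_cons, h, if_true, Bool.true_or]
    | false => simp only [List.any_cons, h, Bool.false_eq_true, if_false, Bool.false_or, ih]

theorem strLen_cast (s : String) : PySem.Str.len s = (s.length : Int) := by
  simp

theorem bInner_eq_any (w : String) (l : List String)
    (hp : l.Pairwise (fun a b => PySem.Str.len b ≤ PySem.Str.len a)) :
    bInner w l = l.any (fun u => (decide (PySem.Str.len w < PySem.Str.len u)) && PySem.Str.isIn w u) := by
  induction l with
  | nil => rfl
  | cons u rest ih =>
    obtain ⟨hu, hrest⟩ := List.pairwise_cons.mp hp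
    show (if PySem.Str.len u ≤ PySem.Str.len w then false
          else if PySem.Str.isIn w u then true else bInner w rest) = _
    by_cases hle : PySem.Str.len u ≤ PySem.Str.len w
    · rw [if_pos hle]
      rw [strLen_cast, strLen_cast] at hle
      have h1 : (decide (PySem.Str.len w < PySem.Str.len u) && PySem.Str.isIn w u) = false := by
        have hn : ¬ (w.length < u.length) := by omega
        simp [hn]
      have h2 : (rest.any fun v => decide (PySem.Str.len w < PySem.Str.len v) && PySem.Str.isIn w v) = false := by
        rw [List.any_eq_false]
        intro v hv
        have hv' := hu v hv
        rw [strLen_cast, strLen_cast] at hv'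
        have hn : ¬ (w.length < v.length) := by omega
        simp [hn]
      rw [List.any_cons, h1, h2]
      rfl
    · rw [if_neg hle]
      rw [strLen_cast, strLen_cast] at hle
      have hlt : decide (PySem.Str.len w < PySem.Str.len u) = true := by
        have : w.length < u.length := by omega
        simp [this]
      by_cases hin : PySem.Str.isIn w u = true
      · rw [if_pos hin, List.any_cons, hlt, hin]
        rfl
      · rw [if_neg hin, List.any_cons, hlt]
        have hin' : PySem.Str.isIn w u = false := by simpa using hin
        rw [hin', ih hrest]
        rfl

-- two distinct indices carrying the same value give count ≥ 2
theorem count_two_of_two_idx {l : List String} {m k : Nat} {v : String} (hm : m < l.length)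
    (hk : k < l.length) (hne : m ≠ k) (hvm : l[m] = v) (hvk : l[k] = v) :
    2 ≤ List.count v l := by
  -- both orders reduce to: one occurrence in a prefix, one in the rest
  have main : ∀ (a b : Nat), a < b → ∀ (ha : a < l.length) (hb : b < l.length),
      l[a] = v → l[b] = v → 2 ≤ List.count v l := by
    intro a b hab ha hb hva hvb
    have hdecomp : l = l.take (a+1) ++ l.drop (a+1) := (List.take_append_drop _ _).symm
    have hcnt : List.count v l = List.count v (l.take (a+1)) + List.count v (l.drop (a+1)) := by
      conv_lhs => rw [hdecomp]
      exact List.count_append ..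
    have h1 : v ∈ l.take (a+1) := by
      have haa : a < (l.take (a+1)).length := by simp; omega
      have : (l.take (a+1))[a] = l[a] := List.getElem_take
      exact (hva ▸ this) ▸ List.getElem_mem haa
    have h2 : v ∈ l.drop (a+1) := by
      have hj : b - (a+1) < (l.drop (a+1)).length := by simp; omega
      refine List.mem_iff_getElem.mpr ⟨b - (a+1), hj, ?_⟩
      rw [List.getElem_drop]
      have hb' : (a+1) + (b - (a+1)) = b := by omega
      simp only [hb']
      exact hvb
    have c1 := List.count_pos_iff.mpr h1
    have c2 := List.count_pos_iff.mpr h2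
    omega
  rcases Nat.lt_or_ge m k with hlt | hge
  · exact main m k hlt hm hk hvm hvk
  · exact main k m (by omega) hk hm hvk hvm

-- count ≥ 2 gives a second index carrying the same value
theorem exists_other_idx_of_count {l : List String} {k : Nat} {v : String} (hk : k < l.length)
    (hvk : l[k] = v) (h : 2 ≤ List.count v l) :
    ∃ m, ∃ _ : m < l.length, m ≠ k ∧ l[m] = v := by
  have hdecomp : l = l.take k ++ l.drop k := (List.take_append_drop _ _).symm
  have hdrop : l.drop k = v :: l.drop (k+1) := by
    rw [List.drop_eq_getElem_cons hk, hvk]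
  have hcnt : List.count v l
      = List.count v (l.take k) + (1 + List.count v (l.drop (k+1))) := by
    conv_lhs => rw [hdecomp]
    rw [List.count_append, hdrop, List.count_cons_self]
    omega
  have hsplit : 1 ≤ List.count v (l.take k) ∨ 1 ≤ List.count v (l.drop (k+1)) := by omega
  rcases hsplit with h1 | h1
  · have hmem : v ∈ l.take k := List.count_pos_iff.mp (by omega)
    obtain ⟨i, hi, hval⟩ := List.mem_iff_getElem.mp hmem
    have hi' : i < k := by
      have := hi; simp at this; omega
    have hil : i < l.length := by omega
    have hli : l[i] = v := by
      have hgt : (l.take k)[i] = l[i] := List.getElem_take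
      rw [← hgt]; exact hval
    exact ⟨i, hil, by omega, hli⟩
  · have hmem : v ∈ l.drop (k+1) := List.count_pos_iff.mp (by omega)
    obtain ⟨i, hi, hval⟩ := List.mem_iff_getElem.mp hmem
    have hil : (k+1) + i < l.length := by
      have := hi; simp at this; omega
    have hli : l[(k+1)+i] = v := by
      have hgd : (l.drop (k+1))[i] = l[(k+1) + i] := List.getElem_drop
      rw [← hgd]; exact hval
    exact ⟨(k+1)+i, hil, by omega, hli⟩

-- the heart: "some OTHER word contains w" ⟺ "w duplicated, or inside a strictly longer word"
theorem coreIff (words : List String) (k : Nat) (hk : k < words.length) :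
    (∃ m, ∃ _ : m < words.length, m ≠ k ∧ words[k].toList <:+: words[m].toList)
    ↔ (2 ≤ List.count words[k] words
        ∨ ∃ u ∈ words, words[k].toList.length < u.toList.length ∧ words[k].toList <:+: u.toList) := by
  constructor
  · rintro ⟨m, hm, hne, hinf⟩
    by_cases hlen : words[m].toList.length ≤ words[k].toList.length
    · left
      have heq : words[k].toList = words[m].toList :=
        hinf.eq_of_length (Nat.le_antisymm hinf.length_le hlen)
      exact count_two_of_two_idx hm hk hne (String.toList_inj.mp heq.symm) rfl
    · right
      exact ⟨words[m], List.getElem_mem hm, by omega, hinf⟩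
  · rintro (h | ⟨u, hu, hlen, hinf⟩)
    · obtain ⟨m, hm, hne, hv⟩ := exists_other_idx_of_count hk rfl h
      exact ⟨m, hm, hne, hv ▸ List.infix_refl _⟩
    · obtain ⟨m, hm, hv⟩ := List.mem_iff_getElem.mp hu
      refine ⟨m, hm, ?_, hv ▸ hinf⟩
      intro hmk
      subst hmk
      rw [hv] at hlen
      omega

theorem stringMatching_eq (words : List String) : stringMatching words = stringMatching_alt words := by
  unfold stringMatching stringMatching_alt
  simp only []
  rw [show words = (PySem.List.enumerate words).map (fun p => p.2) from (PySem.List.map_snd_enumerate words 0).symm]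
  rw [List.foldl_map]
  rw [PySem.List.map_snd_enumerate]
  apply PySem.List.foldl_congr_mem
  intro acc p hp
  obtain ⟨k, hk, hpk⟩ := (PySem.List.mem_enumerate_iff words 0 p).mp hp
  subst hpk
  simp only [zero_add]
  have hcond : aInner (k : Int) words[k] (PySem.List.enumerate words)
      = ((decide (2 ≤ (PySem.Dict.counter words).getD words[k] 0))
          || bInner words[k] (PySem.List.sorted words PySem.Str.len true)) := by
    rw [aInner_eq_any,
        bInner_eq_any _ _ (PySem.List.sorted_pairwise_rev words PySem.Str.len),
        PySem.Dict.getD_counter]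
    rw [Bool.eq_iff_iff]
    simp only [List.any_eq_true, Bool.and_eq_true, Bool.or_eq_true, decide_eq_true_eq,
      bne_iff_ne, ne_eq, PySem.Str.isIn_iff_infix, PySem.List.mem_sorted]
    constructor
    · rintro ⟨q, hq, hne, hinf⟩
      obtain ⟨m, hm, hqm⟩ := (PySem.List.mem_enumerate_iff words 0 q).mp hq
      subst hqm
      simp only [zero_add] at hne hinf
      have hmk : m ≠ k := fun h => hne (by simp [h])
      have := (coreIff words k hk).mp ⟨m, hm, hmk, hinf⟩
      rcases this with h | ⟨u, hu, hlen, hinf'⟩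
      · left; exact_mod_cast h
      · right
        refine ⟨u, hu, ?_, hinf'⟩
        rw [PySem.Str.len_eq, PySem.Str.len_eq]; exact_mod_cast hlen
    · intro h
      have h' : 2 ≤ List.count words[k] words
          ∨ ∃ u ∈ words, words[k].toList.length < u.toList.length ∧ words[k].toList <:+: u.toList := by
        rcases h with h | ⟨u, hu, hlen, hinf⟩
        · left; exact_mod_cast h
        · right
          refine ⟨u, hu, ?_, hinf⟩
          rw [PySem.Str.len_eq, PySem.Str.len_eq] at hlen; exact_mod_cast hlen
      obtain ⟨m, hm, hmk, hinf⟩ := (coreIff words k hk).mpr h'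
      refine ⟨((m : Int), words[m]), ?_, ?_, hinf⟩
      · exact (PySem.List.mem_enumerate_iff words 0 _).mpr ⟨m, hm, by simp⟩
      · intro h
        exact hmk (by exact_mod_cast (show (k : Int) = (m : Int) from h).symm)
  rw [hcond]
  by_cases hc : 2 ≤ List.count words[k] words
  · simp [hc]
  · simp [hc]

-- ===== VERDICT (by name: the statement is the Claim_ definition above) =====
theorem stringMatching_spec : Claim_equal_stringMatching := by
  intro words _
  unfold Spec_stringMatching
  exact stringMatching_eq words
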